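-- pv_equiv track=rewrite | github.com/slackwing/feathers | 12.kaprekar/kaprekar_parallel_v2.py | format_large_number_single
-- ===== SOURCE A (Python) =====
-- def format_large_number_single(number):
--     """Format a single large number with scientific notation.
--     Keep scaled number under 1,000,000 (6 digits)."""
--     if number < 1000000:
--         return str(number)
--
--     # Find the exponent to keep number < 1,000,000
--     exponent = 0
--     temp = number
--     while temp >= 1000000:
--         exponent += 1
--         temp //= 10
--
--     # Scale the number
--     divisor = 10 ** exponent
--     scaled = number // divisor
--
--     return f"{scaled}x10^{exponent}"
-- ===== SOURCE B (Python) =====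
-- def format_large_number_single(number):
--     """Format a single large number with scientific notation.
--     Keep scaled number under 1,000,000 (6 digits)."""
--     if number < 1000000:
--         return str(number)
--     # closed form: the exponent is the digit count minus 6
--     exponent = len(str(number)) - 6
--     divisor = 10 ** exponent
--     scaled = number // divisor
--     return f"{scaled}x10^{exponent}"
-- ===== Notes on version B (the rewrite author's own statement) =====
-- stated objective: simpler
-- what changed: Replaced the while-loop that repeatedly floor-divides to count the exponent by a closed-form exponent computed from the decimal digit count (len(str(number)) - 6).
import Mathlib
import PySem

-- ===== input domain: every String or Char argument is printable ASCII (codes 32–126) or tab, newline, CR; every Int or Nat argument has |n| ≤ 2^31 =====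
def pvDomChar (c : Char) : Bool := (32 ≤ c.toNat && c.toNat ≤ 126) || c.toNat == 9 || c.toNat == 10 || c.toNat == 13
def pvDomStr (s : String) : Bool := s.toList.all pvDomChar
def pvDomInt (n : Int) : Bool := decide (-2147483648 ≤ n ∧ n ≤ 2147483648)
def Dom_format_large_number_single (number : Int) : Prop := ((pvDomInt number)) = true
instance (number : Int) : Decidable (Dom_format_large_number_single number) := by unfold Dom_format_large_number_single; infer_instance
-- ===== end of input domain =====

-- B replaces A's while-loop exponent count by the closed form len(str(number)) - 6 (simpler; return value only).

-- ===== PORT A =====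
-- termination helper for the while-loop: temp //= 10 strictly shrinks while temp >= 1000000
lemma pv_floordiv10_toNat_lt (t : Int) (h : 1000000 ≤ t) :
    (PySem.Int.floordiv t 10).toNat < t.toNat := by
  rw [PySem.Int.floordiv_eq_ediv_of_pos (by omega : (0:Int) < 10)]
  omega

-- 'while temp >= 1000000: exponent += 1; temp //= 10' (state = (exponent, temp))
def pvLoopA (exponent : Int) (temp : Int) : Int × Int :=
  if h : 1000000 ≤ temp then
    pvLoopA (exponent + 1) (PySem.Int.floordiv temp 10)
  else (exponent, temp)
termination_by temp.toNat
decreasing_by exact pv_floordiv10_toNat_lt temp h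

def format_large_number_single (number : Int) : String :=
  if number < 1000000 then PySem.Int.toStr number
  else
    let exponent := (pvLoopA 0 number).1
    -- 10 ** exponent: exponent ≥ 0 on every path reaching here
    let divisor := (10 : Int) ^ exponent.toNat
    let scaled := PySem.Int.floordiv number divisor
    -- f"{scaled}x10^{exponent}"
    String.ofList (PySem.Int.toChars scaled ++ ['x', '1', '0', '^'] ++ PySem.Int.toChars exponent)

-- ===== PORT B =====
def format_large_number_single_alt (number : Int) : String :=
  if number < 1000000 then PySem.Int.toStr number
  else
    let exponent := PySem.Str.len (PySem.Int.toStr number) - 6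
    let divisor := (10 : Int) ^ exponent.toNat
    let scaled := PySem.Int.floordiv number divisor
    String.ofList (PySem.Int.toChars scaled ++ ['x', '1', '0', '^'] ++ PySem.Int.toChars exponent)

-- ===== PRECONDITION & SPEC =====
def Spec_format_large_number_single (number : Int) (out : String) : Prop := out = format_large_number_single_alt number
instance (number : Int) (out : String) : Decidable (Spec_format_large_number_single number out) := by unfold Spec_format_large_number_single; infer_instance

-- ===== CLAIM (what is proved, stated in full; the proofs are below) =====
def Claim_equal_format_large_number_single : Prop := ∀ (number : Int), Dom_format_large_number_single number → Spec_format_large_number_single number (format_large_number_single number)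

-- ===== LEMMAS AND PROOFS =====

-- toDigitsCore always appends at least one digit (with positive fuel)
lemma pv_toDigitsCore_len_lb0 : ∀ (f n : Nat) (l : List Char),
    l.length + 1 ≤ (Nat.toDigitsCore 10 (f + 1) n l).length := by
  intro f
  induction f with
  | zero =>
    intro n l
    simp only [Nat.toDigitsCore]
    split <;> simp
  | succ f ih =>
    intro n l
    rw [show Nat.toDigitsCore 10 (f + 1 + 1) n l =
        if n / 10 = 0 then (n % 10).digitChar :: l
        else Nat.toDigitsCore 10 (f + 1) (n / 10) ((n % 10).digitChar :: l) from rfl]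
    split
    · simp
    · have := ih (n / 10) (Nat.digitChar (n % 10) :: l)
      simp only [List.length_cons] at this
      omega

-- lower bound: 10^e ≤ n gives at least e+1 digits
lemma pv_toDigitsCore_len_lb : ∀ (e f n : Nat) (l : List Char), n < f → 10 ^ e ≤ n →
    e + 1 + l.length ≤ (Nat.toDigitsCore 10 f n l).length := by
  intro e
  induction e with
  | zero =>
    intro f n l hf h
    obtain ⟨f', rfl⟩ : ∃ f', f = f' + 1 := ⟨f - 1, by omega⟩
    have := pv_toDigitsCore_len_lb0 f' n l
    omega
  | succ e ih =>
    intro f n l hf h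
    obtain ⟨f', rfl⟩ : ∃ f', f = f' + 1 := ⟨f - 1, by omega⟩
    have h10 : 10 ^ (e + 1) ≤ n := h
    have hten : (10:Nat) ^ 1 ≤ 10 ^ (e+1) := Nat.pow_le_pow_right (by omega) (by omega)
    have hn10 : 10 ≤ n := by simpa using le_trans hten h10
    have hdiv : n / 10 ≠ 0 := by omega
    simp only [Nat.toDigitsCore, hdiv, if_false]
    have hle : 10 ^ e ≤ n / 10 := by
      rw [Nat.le_div_iff_mul_le (by omega)]
      calc 10 ^ e * 10 = 10 ^ (e + 1) := by ring
        _ ≤ n := h10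
    have hflt : n / 10 < f' := by omega
    have := ih f' (n / 10) (Nat.digitChar (n % 10) :: l) hflt hle
    simp only [List.length_cons] at this
    omega

-- exact digit count on a decade interval
lemma pv_toDigits_len_eq (e n : Nat) (h1 : 10 ^ e ≤ n) (h2 : n < 10 ^ (e + 1)) :
    (Nat.toDigits 10 n).length = e + 1 := by
  have hub := Nat.toDigits_length 10 n (e + 1) (by omega) h2
  have hlb := pv_toDigitsCore_len_lb e (n + 1) n [] (by omega) h1
  simp only [List.length_nil, Nat.add_zero] at hlb
  unfold Nat.toDigits at hub ⊢
  omega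

-- len(str n) for nonnegative n is the digit count
lemma pv_len_toStr (n : Int) (h : 0 ≤ n) :
    PySem.Str.len (PySem.Int.toStr n) = ((Nat.toDigits 10 n.toNat).length : Int) := by
  simp [PySem.Str.len, PySem.Int.toStr, PySem.Int.toChars, not_lt.mpr h]

-- the while-loop adds k+1 to the exponent on the interval [10^6·10^k, 10^7·10^k)
lemma pv_loop_eq : ∀ (k : Nat) (e n : Int),
    1000000 * 10 ^ k ≤ n → n < 10000000 * 10 ^ k → (pvLoopA e n).1 = e + (k + 1) := by
  intro k
  induction k with
  | zero =>
    intro e n h1 h2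
    simp only [pow_zero, mul_one] at h1 h2
    rw [pvLoopA, dif_pos h1, pvLoopA, dif_neg]
    · simp
    · rw [not_le, PySem.Int.floordiv_lt_iff_lt_mul (by omega)]
      omega
  | succ k ih =>
    intro e n h1 h2
    have hp : (1:Int) ≤ 10 ^ (k + 1) := one_le_pow₀ (by omega)
    have h1' : 1000000 ≤ n := by nlinarith
    rw [pvLoopA, dif_pos h1']
    have hlow : 1000000 * 10 ^ k ≤ PySem.Int.floordiv n 10 := by
      rw [PySem.Int.le_floordiv_iff_mul_le (by omega)]
      calc 1000000 * 10 ^ k * 10 = 1000000 * 10 ^ (k + 1) := by ring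
        _ ≤ n := h1
    have hhigh : PySem.Int.floordiv n 10 < 10000000 * 10 ^ k := by
      rw [PySem.Int.floordiv_lt_iff_lt_mul (by omega)]
      calc n < 10000000 * 10 ^ (k + 1) := h2
        _ = 10000000 * 10 ^ k * 10 := by ring
    have := ih (e + 1) (PySem.Int.floordiv n 10) hlow hhigh
    rw [this]; push_cast; ring

-- B's closed-form exponent: len(str n) - 6 = k+1 on the same interval
lemma pv_len_eq (k : Nat) (n : Int)
    (h1 : 1000000 * 10 ^ k ≤ n) (h2 : n < 10000000 * 10 ^ k) :
    PySem.Str.len (PySem.Int.toStr n) - 6 = (k : Int) + 1 := by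
  have hpos : (0:Int) < 10 ^ k := pow_pos (by omega) k
  have h0 : 0 ≤ n := by nlinarith
  rw [pv_len_toStr n h0]
  have hd : (Nat.toDigits 10 n.toNat).length = (6 + k) + 1 := by
    apply pv_toDigits_len_eq
    · have : ((10:Nat) ^ (6 + k) : Int) ≤ n := by push_cast; calc
        ((10:Int)) ^ (6 + k) = 1000000 * 10 ^ k := by ring
        _ ≤ n := h1
      omega
    · have : n < ((10:Nat) ^ (6 + k + 1) : Int) := by push_cast; calc
        n < 10000000 * 10 ^ k := h2
        _ = (10:Int) ^ (6 + k + 1) := by ring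
      omega
  rw [hd]; push_cast; ring

-- the two exponent computations agree for 10^6 ≤ n ≤ 2^31
lemma pv_exp_eq (n : Int) (h1 : 1000000 ≤ n) (h2 : n ≤ 2147483648) :
    (pvLoopA 0 n).1 = PySem.Str.len (PySem.Int.toStr n) - 6 := by
  have step : ∀ k : Nat, 1000000 * 10 ^ k ≤ n → n < 10000000 * 10 ^ k →
      (pvLoopA 0 n).1 = PySem.Str.len (PySem.Int.toStr n) - 6 := by
    intro k ha hb
    rw [pv_loop_eq k 0 n ha hb, pv_len_eq k n ha hb]
    ring
  by_cases c1 : n < 10000000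
  · exact step 0 (by norm_num; omega) (by norm_num; omega)
  · by_cases c2 : n < 100000000
    · exact step 1 (by norm_num; omega) (by norm_num; omega)
    · by_cases c3 : n < 1000000000
      · exact step 2 (by norm_num; omega) (by norm_num; omega)
      · exact step 3 (by norm_num; omega) (by norm_num; omega)

-- ===== VERDICT (by name: the statement is the Claim_ definition above) =====
theorem format_large_number_single_spec : Claim_equal_format_large_number_single := by
  intro n hdom
  have hd : -2147483648 ≤ n ∧ n ≤ 2147483648 := by
    have := hdom
    unfold Dom_format_large_number_single pvDomInt at this
    exact of_decide_eq_true this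
  unfold Spec_format_large_number_single format_large_number_single format_large_number_single_alt
  by_cases h : n < 1000000
  · simp [h]
  · simp only [h, if_false]
    rw [pv_exp_eq n (by omega) hd.2]
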